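-- pv_equiv track=rewrite | github.com/steel-experiments/oss-ai-stack-map | src/oss_ai_stack_map/pipeline/reporting.py | split_vendor_tokens
-- ===== SOURCE A (Python) =====
-- def split_vendor_tokens(value: str) -> list[str]:
--     cleaned = (
--         value.casefold()
--         .replace("@", " ")
--         .replace("/", " ")
--         .replace("-", " ")
--         .replace("_", " ")
--         .replace(".", " ")
--     )
--     return [token for token in cleaned.split() if token]
-- ===== SOURCE B (Python) =====
-- def split_vendor_tokens(value: str) -> list[str]:
--     tokens = []
--     buf = []
--     for ch in value.casefold():
--         if ch in "@/-_." or ch.isspace():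
--             if buf:
--                 tokens.append("".join(buf))
--                 buf = []
--         else:
--             buf.append(ch)
--     if buf:
--         tokens.append("".join(buf))
--     return tokens
-- ===== Notes on version B (the rewrite author's own statement) =====
-- stated objective: alternative
-- what changed: Replaces the five full-string replace passes plus a split pass with a single fused left-to-right scan that flushes a token buffer at separator/whitespace characters.
import Mathlib
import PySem

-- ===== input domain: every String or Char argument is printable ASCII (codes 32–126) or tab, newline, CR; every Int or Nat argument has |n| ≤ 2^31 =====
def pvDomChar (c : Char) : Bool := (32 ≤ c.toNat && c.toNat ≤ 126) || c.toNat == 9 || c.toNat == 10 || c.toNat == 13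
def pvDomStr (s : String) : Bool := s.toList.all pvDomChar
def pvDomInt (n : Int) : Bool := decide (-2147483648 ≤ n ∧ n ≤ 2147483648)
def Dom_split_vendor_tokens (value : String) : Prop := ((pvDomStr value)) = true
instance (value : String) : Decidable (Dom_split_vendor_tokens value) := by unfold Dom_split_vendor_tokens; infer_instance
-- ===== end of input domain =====

-- B fuses A's five replace passes and the split into one left-to-right scan with a token buffer (alternative decomposition, one pass instead of six).
-- casefold is ported as PySem.Str.lower: identical on the printable-ASCII input domain.


-- ===== PORT A =====
def split_vendor_tokens (value : String) : List String :=
  let cleaned :=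
    PySem.Str.replace (PySem.Str.replace (PySem.Str.replace (PySem.Str.replace (PySem.Str.replace
      (PySem.Str.lower value) "@" " ") "/" " ") "-" " ") "_" " ") "." " "
  (PySem.Str.split₀ cleaned).filter (fun token => !(token == ""))

-- ===== PORT B =====
-- `ch in "@/-_." or ch.isspace()`
def pvIsSep (c : Char) : Bool :=
  (c == '@' || c == '/' || c == '-' || c == '_' || c == '.') || PySem.Chars.isspace c

def split_vendor_tokens_alt (value : String) : List String :=
  let st := (PySem.Str.lower value).toList.foldl
      (fun (st : List String × List Char) c =>
        if pvIsSep c then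
          (if st.2.isEmpty then st.1 else st.1 ++ [String.ofList st.2], ([] : List Char))
        else
          (st.1, st.2 ++ [c]))
      ([], [])
  if st.2.isEmpty then st.1 else st.1 ++ [String.ofList st.2]

-- ===== PRECONDITION & SPEC =====
def Spec_split_vendor_tokens (value : String) (out : List String) : Prop := out = split_vendor_tokens_alt value
instance (value : String) (out : List String) : Decidable (Spec_split_vendor_tokens value out) := by unfold Spec_split_vendor_tokens; infer_instance

-- ===== CLAIM (what is proved, stated in full; the proofs are below) =====
def Claim_equal_split_vendor_tokens : Prop := ∀ (value : String), Dom_split_vendor_tokens value → Spec_split_vendor_tokens value (split_vendor_tokens value)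

-- ===== LEMMAS AND PROOFS =====

-- one single-character replace-by-space, as a function on characters
def pvRep (a c : Char) : Char := if c = a then ' ' else c

-- the five replaces composed
def pvG (c : Char) : Char := pvRep '.' (pvRep '_' (pvRep '-' (pvRep '/' (pvRep '@' c))))

lemma pvReplace_go_map (a : Char) : ∀ (l acc : List Char),
    PySem.Chars.replace.go [a] [' '] l.length l acc = acc.reverse ++ l.map (pvRep a) := by
  intro l
  induction l with
  | nil => intro acc; simp [PySem.Chars.replace.go]
  | cons c t ih =>
    intro acc
    by_cases h : c = a
    · subst h
      simpa [PySem.Chars.replace.go, pvRep] using ih (' ' :: acc)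
    · have hp : List.isPrefixOf [a] (c :: t) = false := by
        simp [List.isPrefixOf, Ne.symm h]
      simpa [PySem.Chars.replace.go, hp, pvRep, h] using ih (c :: acc)

lemma pvReplace_single (a : Char) (s : List Char) :
    PySem.Chars.replace s [a] [' '] = s.map (pvRep a) := by
  simp [PySem.Chars.replace, pvReplace_go_map]

lemma pvIsspace_pvG (c : Char) : PySem.Chars.isspace (pvG c) = pvIsSep c := by
  by_cases h : (c = '@' ∨ c = '/' ∨ c = '-' ∨ c = '_' ∨ c = '.')
  · rcases h with h | h | h | h | h <;> subst h <;> decide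
  · push_neg at h
    obtain ⟨h1, h2, h3, h4, h5⟩ := h
    simp [pvG, pvRep, pvIsSep, h1, h2, h3, h4, h5]

lemma pvG_of_not_sep (c : Char) (h : pvIsSep c = false) : pvG c = c := by
  simp only [pvIsSep, Bool.or_eq_false_iff, beq_eq_false_iff_ne, ne_eq] at h
  obtain ⟨⟨⟨⟨⟨h1, h2⟩, h3⟩, h4⟩, h5⟩, _⟩ := h
  simp [pvG, pvRep, h1, h2, h3, h4, h5]

lemma pvIsspace_of_not_sep (c : Char) (h : pvIsSep c = false) :
    PySem.Chars.isspace c = false := by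
  simp only [pvIsSep, Bool.or_eq_false_iff] at h
  exact h.2

lemma pvOfList_ne_empty (buf : List Char) (h : buf ≠ []) : String.ofList buf ≠ "" := by
  intro he
  apply h
  have := congrArg String.toList he
  simpa using this

lemma pvMapOfToList : ∀ (ts : List String), ts.map (String.ofList ∘ String.toList) = ts := by
  intro ts
  induction ts with
  | nil => rfl
  | cons a t ih => simp only [List.map_cons, Function.comp_apply, String.ofList_toList, ih]

lemma pvFilterNe (ts : List String) (h : ∀ t ∈ ts, ¬ t = "") :
    ts.filter (fun token => !(token == "")) = ts := by
  rw [List.filter_eq_self]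
  intro a ha
  simpa using h a ha

-- the loop invariant: split₀.go over the mapped string ≙ B's fold, tokens accumulated reversed
lemma pvGo_key : ∀ (s : List Char) (toks : List String) (buf : List Char),
    (∀ t ∈ toks, ¬ t = "") →
    ((PySem.Chars.split₀.go (s.map pvG) buf.reverse ((toks.map String.toList).reverse)).map
        String.ofList).filter (fun token => !(token == ""))
    = (let st := s.foldl
          (fun (st : List String × List Char) c =>
            if pvIsSep c then
              (if st.2.isEmpty then st.1 else st.1 ++ [String.ofList st.2], ([] : List Char))
            else
              (st.1, st.2 ++ [c]))
          (toks, buf);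
       if st.2.isEmpty then st.1 else st.1 ++ [String.ofList st.2]) := by
  intro s
  induction s with
  | nil =>
    intro toks buf htoks
    by_cases hb : buf = []
    · subst hb
      simp only [List.map_nil, PySem.Chars.split₀.go, List.isEmpty_reverse, List.isEmpty_nil,
        if_pos, List.reverse_reverse, List.map_map, List.foldl_nil]
      rw [pvMapOfToList toks]
      exact pvFilterNe toks htoks
    · have hbe : buf.isEmpty = false := by simpa [List.isEmpty_iff] using hb
      simp only [List.map_nil, PySem.Chars.split₀.go, List.isEmpty_reverse, hbe,
        Bool.false_eq_true, List.reverse_cons, List.reverse_reverse, List.foldl_nil,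
        List.map_append, List.map_map, List.map_cons, List.map_nil, if_false]
      rw [pvMapOfToList toks]
      have hAll : ∀ t ∈ toks ++ [String.ofList buf], ¬ t = "" := by
        intro t ht
        rcases List.mem_append.mp ht with h | h
        · exact htoks t h
        · simp only [List.mem_singleton] at h
          subst h
          exact pvOfList_ne_empty buf hb
      rw [pvFilterNe _ hAll]
  | cons c t ih =>
    intro toks buf htoks
    by_cases hs : pvIsSep c = true
    · by_cases hb : buf = []
      · subst hb
        simpa [PySem.Chars.split₀.go, pvIsspace_pvG, hs] using ih toks [] htoks
      · have hbe : buf.isEmpty = false := by simpa [List.isEmpty_iff] using hb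
        have htoks' : ∀ u ∈ toks ++ [String.ofList buf], ¬ u = "" := by
          intro u hu
          rcases List.mem_append.mp hu with h | h
          · exact htoks u h
          · simp only [List.mem_singleton] at h; subst h; exact pvOfList_ne_empty buf hb
        have := ih (toks ++ [String.ofList buf]) [] htoks'
        simp only [List.map_append, List.map_cons, List.map_nil, List.reverse_append,
          List.reverse_cons, List.reverse_nil, List.nil_append, List.cons_append,
          String.toList_ofList] at this
        simpa [PySem.Chars.split₀.go, pvIsspace_pvG, hs, hbe, hb] using this
    · have hs' : pvIsSep c = false := by simpa using hs
      have := ih toks (buf ++ [c]) htoks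
      simp only [List.reverse_append, List.reverse_cons, List.reverse_nil, List.nil_append,
        List.singleton_append] at this
      simpa [PySem.Chars.split₀.go, pvG_of_not_sep c hs', pvIsspace_of_not_sep c hs',
        hs'] using this

-- ===== VERDICT (by name: the statement is the Claim_ definition above) =====
theorem split_vendor_tokens_spec : Claim_equal_split_vendor_tokens := by
  intro value _
  unfold Spec_split_vendor_tokens
  have hsplit : ∀ s : String,
      PySem.Str.split₀ s = (PySem.Chars.split₀ s.toList).map String.ofList := by
    intro s
    rw [← PySem.Str.split₀_map_toList s, List.map_map]
    exact (pvMapOfToList _).symm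
  have e1 : split_vendor_tokens value =
      (PySem.Str.split₀ (PySem.Str.replace (PySem.Str.replace (PySem.Str.replace
        (PySem.Str.replace (PySem.Str.replace (PySem.Str.lower value) "@" " ") "/" " ")
        "-" " ") "_" " ") "." " ")).filter (fun token => !(token == "")) := rfl
  have hclean :
      (PySem.Str.replace (PySem.Str.replace (PySem.Str.replace (PySem.Str.replace (PySem.Str.replace
        (PySem.Str.lower value) "@" " ") "/" " ") "-" " ") "_" " ") "." " ").toList
      = (PySem.Str.lower value).toList.map pvG := by
    simp only [PySem.Str.toList_replace]
    have h64 : (String.toList "@") = ['@'] := by decide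
    have h47 : (String.toList "/") = ['/'] := by decide
    have h45 : (String.toList "-") = ['-'] := by decide
    have h95 : (String.toList "_") = ['_'] := by decide
    have h46 : (String.toList ".") = ['.'] := by decide
    have hsp : (String.toList " ") = [' '] := by decide
    rw [h64, h47, h45, h95, h46, hsp]
    simp only [pvReplace_single, List.map_map]
    rfl
  rw [e1, hsplit, hclean]
  have hkey := pvGo_key (PySem.Str.lower value).toList [] [] (by simp)
  simpa [PySem.Chars.split₀, split_vendor_tokens_alt] using hkey
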